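-- pv_equiv track=rewrite | github.com/eignatenkov/adventofcode2019 | solutions/day_01.py | find_total_fuel_for_module
-- ===== SOURCE A (Python) =====
-- def find_fuel_for_module(module_mass):
--     return max(module_mass // 3 - 2, 0)
--
-- def find_total_fuel_for_module(module_mass):
--     total_fuel = 0
--     current_weight = module_mass
--     while True:
--         new_fuel = find_fuel_for_module(current_weight)
--         if new_fuel == 0:
--             return total_fuel
--         else:
--             total_fuel += new_fuel
--             current_weight = new_fuel
-- ===== SOURCE B (Python) =====
-- def find_total_fuel_for_module(module_mass):
--     # Sum each "fuel for fuel" level directly from the original mass: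
--     # the k-th level of fuel equals (module_mass - 3*(3**k - 1)) // 3**k.
--     total = 0
--     p = 3
--     while True:
--         term = (module_mass - 3 * (p - 1)) // p
--         if term <= 0:
--             return total
--         total += term
--         p *= 3
-- ===== Notes on version B (the rewrite author's own statement) =====
-- stated objective: alternative
-- what changed: Instead of iterating find_fuel_for_module on the previous fuel with an accumulator, B computes each fuel-for-fuel level directly from the original mass via the closed form (module_mass - 3*(3^k - 1)) // 3^k and sums the positive levels.
import Mathlib
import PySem

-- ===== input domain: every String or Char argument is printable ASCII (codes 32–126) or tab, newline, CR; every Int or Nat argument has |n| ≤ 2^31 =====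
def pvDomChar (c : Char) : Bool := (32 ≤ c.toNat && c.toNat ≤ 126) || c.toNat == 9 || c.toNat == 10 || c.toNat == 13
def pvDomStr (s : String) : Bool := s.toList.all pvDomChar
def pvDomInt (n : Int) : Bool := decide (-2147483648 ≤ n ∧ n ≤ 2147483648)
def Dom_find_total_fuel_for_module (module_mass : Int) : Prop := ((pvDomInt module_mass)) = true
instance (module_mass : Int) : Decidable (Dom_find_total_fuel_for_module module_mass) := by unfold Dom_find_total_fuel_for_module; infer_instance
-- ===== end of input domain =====

-- B replaces A's iterate-the-fuel loop by summing each fuel-for-fuel level computed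
-- directly from the original mass via the closed form (m - 3*(3^k - 1)) // 3^k
-- (alternative algorithm, same cost); both loops carry a Nat fuel only to be total in Lean.

-- ===== PORT A =====
-- Python's find_fuel_for_module helper (used by A only)
def find_fuel_for_module (module_mass : Int) : Int :=
  max (PySem.Int.floordiv module_mass 3 - 2) 0

-- A's 'while True' loop over state (current_weight, total_fuel); the Nat fuel only
-- bounds the iteration count (each step strictly shrinks current_weight.toNat)
def find_total_fuel_loop : Nat → Int → Int → Int
  | 0, _, total_fuel => total_fuel
  | n + 1, current_weight, total_fuel =>
    let new_fuel := find_fuel_for_module current_weight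
    if new_fuel = 0 then total_fuel
    else find_total_fuel_loop n new_fuel (total_fuel + new_fuel)

def find_total_fuel_for_module (module_mass : Int) : Int :=
  find_total_fuel_loop (module_mass.toNat + 1) module_mass 0

-- ===== PORT B =====
-- B's loop over the power p = 3^k: add the k-th level (module_mass - 3*(p-1)) // p
-- while it is positive; same Nat fuel bound as A's loop
def level_sum_loop : Nat → Int → Int → Int → Int
  | 0, _, _, total => total
  | n + 1, module_mass, p, total =>
    let term := PySem.Int.floordiv (module_mass - 3 * (p - 1)) p
    if term ≤ 0 then total
    else level_sum_loop n module_mass (3 * p) (total + term)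

def find_total_fuel_for_module_alt (module_mass : Int) : Int :=
  level_sum_loop (module_mass.toNat + 1) module_mass 3 0

-- ===== PRECONDITION & SPEC =====
def Spec_find_total_fuel_for_module (module_mass : Int) (out : Int) : Prop := out = find_total_fuel_for_module_alt module_mass
instance (module_mass : Int) (out : Int) : Decidable (Spec_find_total_fuel_for_module module_mass out) := by unfold Spec_find_total_fuel_for_module; infer_instance

-- ===== CLAIM (what is proved, stated in full; the proofs are below) =====
def Claim_equal_find_total_fuel_for_module : Prop := ∀ (module_mass : Int), Dom_find_total_fuel_for_module module_mass → Spec_find_total_fuel_for_module module_mass (find_total_fuel_for_module module_mass)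

-- ===== LEMMAS AND PROOFS =====
-- floor division identity: (m - 6) / 3 = m / 3 - 2 (ediv with positive divisor)
theorem ediv_sub_six (m : Int) : (m - 6) / 3 = m / 3 - 2 := by
  omega

-- the key level-shift identity: the level term for (3*p) on mass m equals the
-- level term for p on the shifted mass (m - 6)/3
theorem term_shift (m p : Int) :
    (m - 3 * (3 * p - 1)) / (3 * p) = ((m - 6) / 3 - 3 * (p - 1)) / p := by
  have h1 : (m - 6) / 3 - 3 * (p - 1) = ((m - 6) + (-(3 * (p - 1))) * 3) / 3 := by
    rw [Int.add_mul_ediv_right _ _ (by norm_num : (3:Int) ≠ 0)]; ring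
  rw [h1, Int.ediv_ediv_of_nonneg (by omega : (0:Int) ≤ 3)]
  congr 1; ring

-- shift lemma for the whole loop: starting at power 3*p on mass m equals starting
-- at power p on the shifted mass (m - 6)/3
theorem level_sum_shift (n : Nat) : ∀ (m p t : Int), 0 < p →
    level_sum_loop n m (3 * p) t = level_sum_loop n ((m - 6) / 3) p t := by
  induction n with
  | zero => intro m p t _; rfl
  | succ n ih =>
    intro m p t hp
    simp only [level_sum_loop,
      PySem.Int.floordiv_eq_ediv_of_pos (by omega : (0:Int) < 3 * p),
      PySem.Int.floordiv_eq_ediv_of_pos hp, term_shift m p]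
    split_ifs with h
    · rfl
    · exact ih m (3 * p) _ (by omega)

-- a nonzero fuel is strictly smaller than the mass (so the Nat fuel never runs out)
theorem fuel_toNat_lt (m : Int) (h : find_fuel_for_module m ≠ 0) :
    (find_fuel_for_module m).toNat < m.toNat := by
  unfold find_fuel_for_module at *
  rw [PySem.Int.floordiv_eq_ediv_of_pos (by norm_num)] at *
  omega

-- main invariant: with enough fuel, A's loop from (c, t) equals B's level sum from power 3
theorem loop_eq_level_sum (n : Nat) : ∀ (c t : Int), c.toNat < n →
    find_total_fuel_loop n c t = level_sum_loop n c 3 t := by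
  induction n with
  | zero => intro c t h; omega
  | succ n ih =>
    intro c t h
    have h3 : PySem.Int.floordiv (c - 3 * (3 - 1)) 3 = c / 3 - 2 := by
      rw [PySem.Int.floordiv_eq_ediv_of_pos (by norm_num : (0:Int) < 3)]
      omega
    have hf : find_fuel_for_module c = max (c / 3 - 2) 0 := by
      unfold find_fuel_for_module
      rw [PySem.Int.floordiv_eq_ediv_of_pos (by norm_num : (0:Int) < 3)]
    by_cases h0 : find_fuel_for_module c = 0
    · have hle : c / 3 - 2 ≤ 0 := by rw [hf] at h0; omega
      have hA : find_total_fuel_loop (n + 1) c t = t := by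
        simp [find_total_fuel_loop, h0]
      have hB : level_sum_loop (n + 1) c 3 t = t := by
        simp only [level_sum_loop, h3]
        rw [if_pos (by omega : c / 3 - 2 ≤ 0)]
      rw [hA, hB]
    · have hpos : 0 < c / 3 - 2 := by rw [hf] at h0; omega
      have hfc : find_fuel_for_module c = c / 3 - 2 := by rw [hf]; omega
      have hlt := fuel_toNat_lt c h0
      simp only [find_total_fuel_loop, level_sum_loop, h0, if_false, h3,
        if_neg (by omega : ¬ (c / 3 - 2 ≤ 0))]
      rw [level_sum_shift n c 3 (t + (c / 3 - 2)) (by norm_num),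
        show (c - 6) / 3 = c / 3 - 2 from ediv_sub_six c, ← hfc]
      exact ih _ _ (by omega)

-- ===== VERDICT (by name: the statement is the Claim_ definition above) =====
theorem find_total_fuel_for_module_spec : Claim_equal_find_total_fuel_for_module := by
  intro m _
  unfold Spec_find_total_fuel_for_module find_total_fuel_for_module find_total_fuel_for_module_alt
  exact loop_eq_level_sum (m.toNat + 1) m 0 (by omega)
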